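-- pv_equiv track=rewrite | github.com/acornaeology/acorn-nfs | generate_335k.py | group_logical_statements
-- ===== SOURCE A (Python) =====
-- def group_logical_statements(lines):
--     """Group lines into logical statements, tracking open parentheses.
--
--     Returns list of (start_line_idx, end_line_idx_exclusive, lines_list).
--     Multi-line function calls (where parens aren't balanced) are grouped together.
--     """
--     groups = []
--     current_start = 0
--     current_lines = []
--     paren_depth = 0
--
--     for i, line in enumerate(lines):
--         current_lines.append(line)
--
--         # Count parens, ignoring those in strings and comments
--         in_string = None
--         escaped = False
--         code = line
--         # Strip Python comments (# outside strings)
--         comment_stripped = []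
--         in_s = None
--         for j, ch in enumerate(code):
--             if in_s is None:
--                 if ch == '#':
--                     break
--                 if ch in ('"', "'"):
--                     # Check for triple quotes
--                     if code[j:j+3] in ('"""', "'''"):
--                         in_s = code[j:j+3]
--                     else:
--                         in_s = ch
--                 comment_stripped.append(ch)
--             else:
--                 comment_stripped.append(ch)
--                 if not escaped:
--                     if len(in_s) == 3 and code[j:j+3] == in_s:
--                         in_s = None
--                     elif len(in_s) == 1 and ch == in_s:
--                         in_s = None
--                     elif ch == '\\':
--                         escaped = True
--                         continue
--                 escaped = False
--
--         for ch in comment_stripped: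
--             if ch == '(':
--                 paren_depth += 1
--             elif ch == ')':
--                 paren_depth -= 1
--
--         # Also track triple-quoted strings that span lines
--         triple_count = code.count('"""') + code.count("'''")
--
--         if paren_depth <= 0:
--             paren_depth = 0
--             groups.append((current_start, i + 1, current_lines))
--             current_start = i + 1
--             current_lines = []
--
--     if current_lines:
--         groups.append((current_start, current_start + len(current_lines), current_lines))
--
--     return groups
-- ===== SOURCE B (Python) =====
-- def _esc_odd(line, k):
--     """True iff the maximal run of backslashes ending at index k-1 has odd length."""
--     r = 0
--     while r < k and line[k - r - 1] == '\\':
--         r += 1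
--     return r % 2 == 1
--
--
-- def _find_close(line, delim, p):
--     """First index c >= p where `delim` occurs un-escaped; -1 if none."""
--     while True:
--         c = line.find(delim, p)
--         if c == -1:
--             return -1
--         if _esc_odd(line, c):
--             p = c + 1
--         else:
--             return c
--
--
-- def _code_end(line):
--     """Index where the comment starts (first '#' outside a string literal),
--     or len(line) if there is none.  Jumps between delimiters via str.find."""
--     n = len(line)
--     p = 0
--     while True:
--         h = line.find('#', p)
--         dq = line.find('"', p)
--         sq = line.find("'", p)
--         q = min([x for x in (dq, sq) if x != -1], default=-1)
--         if h != -1 and (q == -1 or h < q):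
--             return h
--         if q == -1:
--             return n
--         delim = line[q:q + 3] if line[q:q + 3] in ('"""', "'''") else line[q]
--         c = _find_close(line, delim, q + 1)
--         if c == -1:
--             return n  # unterminated string: the rest of the line is inside it
--         p = c + 1
--
--
-- def group_logical_statements(lines):
--     """Group lines into logical statements, tracking open parentheses.
--
--     Returns list of (start_line_idx, end_line_idx_exclusive, lines_list).
--     """
--     groups = []
--     start = 0
--     depth = 0
--     for i, line in enumerate(lines):
--         code = line[:_code_end(line)]
--         depth += code.count('(') - code.count(')')
--         if depth <= 0:
--             depth = 0
--             groups.append((start, i + 1, lines[start:i + 1]))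
--             start = i + 1
--     if start < len(lines):
--         groups.append((start, len(lines), lines[start:]))
--     return groups
-- ===== Notes on version B (the rewrite author's own statement) =====
-- stated objective: alternative
-- what changed: B finds the comment cut by jumping between delimiter occurrences with str.find (next '#'/quote, then the un-escaped closing quote, deciding escapedness by backslash-run parity) instead of A's per-character in_string/escaped state machine, and then segments the lines by a running depth over per-line count('(')-count(')') deltas, emitting slices of `lines` rather than carrying a current-lines buffer.
import Mathlib
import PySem

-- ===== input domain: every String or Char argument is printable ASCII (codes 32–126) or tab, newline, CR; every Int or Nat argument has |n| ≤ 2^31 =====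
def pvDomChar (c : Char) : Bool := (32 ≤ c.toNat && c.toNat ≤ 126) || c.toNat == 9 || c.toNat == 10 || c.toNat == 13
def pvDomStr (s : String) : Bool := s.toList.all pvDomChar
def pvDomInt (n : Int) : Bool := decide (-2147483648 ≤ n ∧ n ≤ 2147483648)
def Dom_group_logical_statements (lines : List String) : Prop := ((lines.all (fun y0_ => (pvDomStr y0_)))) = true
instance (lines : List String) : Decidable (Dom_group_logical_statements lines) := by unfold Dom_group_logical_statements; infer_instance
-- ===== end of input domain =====

-- B replaces A's per-character in_string/escaped scan by a delimiter-jumping scanner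
-- (str.find to the next '#'/quote, backslash-run parity for escapes) and segments the
-- lines by a running depth over per-line deltas, emitting slices; objective: alternative.

-- ===== PORT A =====
-- A's inner comment-stripping scan: state = (remaining chars, in_s, escaped, accumulated
-- comment_stripped in reverse).  code[j:j+3] is the first 3 chars of the remaining suffix.
def pvScanA : List Char → Option (List Char) → Bool → List Char → List Char
  | [], _, _, acc => acc.reverse
  | ch :: rest, none, esc, acc =>
      if ch = '#' then acc.reverse
      else if ch = '"' ∨ ch = '\'' then
        if (ch :: rest).take 3 = ['"', '"', '"'] ∨ (ch :: rest).take 3 = ['\'', '\'', '\''] then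
          pvScanA rest (some ((ch :: rest).take 3)) esc (ch :: acc)
        else
          pvScanA rest (some [ch]) esc (ch :: acc)
      else pvScanA rest none esc (ch :: acc)
  | ch :: rest, some s, esc, acc =>
      if esc = false then
        if s.length = 3 ∧ (ch :: rest).take 3 = s then pvScanA rest none false (ch :: acc)
        else if s.length = 1 ∧ s = [ch] then pvScanA rest none false (ch :: acc)
        else if ch = '\\' then pvScanA rest (some s) true (ch :: acc)
        else pvScanA rest (some s) false (ch :: acc)
      else pvScanA rest (some s) false (ch :: acc)

-- one iteration of A's `for i, line in enumerate(lines)` body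
-- (A also computes `triple_count = code.count('"""') + code.count("'''")` and never uses it; omitted)
def pvStepA (st : List (Int × Int × List String) × Int × List String × Int)
    (il : Int × String) : List (Int × Int × List String) × Int × List String × Int :=
  let (groups, current_start, current_lines, paren_depth) := st
  let (i, line) := il
  let current_lines := current_lines ++ [line]
  let comment_stripped := pvScanA line.toList none false []
  let paren_depth := comment_stripped.foldl
    (fun d ch => if ch = '(' then d + 1 else if ch = ')' then d - 1 else d) paren_depth
  if paren_depth ≤ 0 then
    (groups ++ [(current_start, i + 1, current_lines)], i + 1, ([] : List String), (0 : Int))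
  else (groups, current_start, current_lines, paren_depth)

def group_logical_statements (lines : List String) : List (Int × Int × List String) :=
  match (PySem.List.enumerate lines).foldl pvStepA ([], 0, [], 0) with
  | (groups, current_start, current_lines, _) =>
    if current_lines ≠ [] then
      groups ++ [(current_start, current_start + (current_lines.length : Int), current_lines)]
    else groups

-- ===== PORT B =====
-- _esc_odd: parity of the maximal backslash run ending at index k-1
-- (Source B indexes line[k-r-1] only under r < k, so getD is exact there)
def pvEscRun (cs : List Char) (k : Nat) (r : Nat) : Nat :=
  if h : r < k ∧ cs.getD (k - r - 1) ' ' = '\\' then pvEscRun cs k (r + 1) else r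
termination_by k - r

def pvEscOdd (cs : List Char) (k : Nat) : Bool := pvEscRun cs k 0 % 2 == 1

-- q = min([x for x in (dq, sq) if x != -1], default=-1)
def pvMinIdx (a b : Int) : Int := if a = -1 then b else if b = -1 then a else min a b

def pvQ (cs : List Char) (p : Nat) : Int :=
  pvMinIdx (PySem.Chars.findFrom cs ['"'] (p : Int)) (PySem.Chars.findFrom cs ['\''] (p : Int))

-- delim = line[q:q+3] if it is a triple quote else line[q]
def pvDelim (cs : List Char) (q : Nat) : List Char :=
  if (cs.drop q).take 3 = ['"', '"', '"'] ∨ (cs.drop q).take 3 = ['\'', '\'', '\''] then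
    (cs.drop q).take 3
  else (cs.drop q).take 1

-- _find_close: jump with find to the first un-escaped occurrence of delim
-- (the `p ≤ cs.length` guard only makes the recursion total; every actual call satisfies it)
def pvFindClose (cs delim : List Char) (p : Nat) : Option Nat :=
  if hp : p ≤ cs.length then
    let c := PySem.Chars.findFrom cs delim (p : Int)
    if hc : c = -1 then none
    else if pvEscOdd cs c.toNat then pvFindClose cs delim (c.toNat + 1)
    else some c.toNat
  else none
termination_by cs.length + 1 - p
decreasing_by
  have h := (PySem.Chars.findFrom_natCast_spec cs delim p hp hc).1
  omega

theorem pvFindClose_some_ge (cs delim : List Char) : ∀ p c, pvFindClose cs delim p = some c → p ≤ c := by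
  intro p
  fun_induction pvFindClose cs delim p with
  | case1 p hp c0 hc => intro c h; simp at h
  | case2 p hp c0 hc hesc ih =>
    intro c h
    have hge := (PySem.Chars.findFrom_natCast_spec cs delim p hp hc).1
    have := ih c h
    omega
  | case3 p hp c0 hc hesc =>
    intro c h
    have hge := (PySem.Chars.findFrom_natCast_spec cs delim p hp hc).1
    have hc' : c = (PySem.Chars.findFrom cs delim (p : Int)).toNat :=
      (Option.some.injEq _ _).mp h.symm
    omega
  | case4 p hp => intro c h; simp at h

theorem pvQ_ge (cs : List Char) (p : Nat) (hp : p ≤ cs.length) (hq : pvQ cs p ≠ -1) :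
    (p : Int) ≤ pvQ cs p := by
  unfold pvQ pvMinIdx at hq ⊢
  split_ifs at hq ⊢ with h1 h2
  · exact (PySem.Chars.findFrom_natCast_spec cs ['\''] p hp hq).1
  · exact (PySem.Chars.findFrom_natCast_spec cs ['"'] p hp hq).1
  · have a1 := (PySem.Chars.findFrom_natCast_spec cs ['"'] p hp h1).1
    have a2 := (PySem.Chars.findFrom_natCast_spec cs ['\''] p hp h2).1
    exact le_min a1 a2

-- _code_end: jump between '#'/quote occurrences; return at the first '#' seen outside a string
-- (the outer `p ≤ cs.length` guard only makes the recursion total; calls satisfy it)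
def pvCodeEndB (cs : List Char) (p : Nat) : Nat :=
  if hp : p ≤ cs.length then
    if PySem.Chars.findFrom cs ['#'] (p : Int) ≠ -1 ∧
        (pvQ cs p = -1 ∨ PySem.Chars.findFrom cs ['#'] (p : Int) < pvQ cs p) then
      (PySem.Chars.findFrom cs ['#'] (p : Int)).toNat
    else if hq : pvQ cs p = -1 then cs.length
    else
      match hc : pvFindClose cs (pvDelim cs (pvQ cs p).toNat) ((pvQ cs p).toNat + 1) with
      | none => cs.length
      | some c => pvCodeEndB cs (c + 1)
  else cs.length
termination_by cs.length + 1 - p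
decreasing_by
  have h1 := pvQ_ge cs p hp hq
  have h2 := pvFindClose_some_ge cs (pvDelim cs (pvQ cs p).toNat) ((pvQ cs p).toNat + 1) c hc
  omega

-- net paren delta of one line (`code.count('(') - code.count(')')` on line[:_code_end(line)])
def pvDelta (line : String) : Int :=
  let code := line.toList.take (pvCodeEndB line.toList 0)
  (code.count '(' : Int) - (code.count ')' : Int)

-- one iteration of B's segmentation pass (`lines` is the closed-over full list)
def pvStepB (lines : List String) (st : List (Int × Int × List String) × Int × Int)
    (il : Int × String) : List (Int × Int × List String) × Int × Int :=
  let (groups, start, depth) := st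
  let (i, line) := il
  let depth := depth + pvDelta line
  if depth ≤ 0 then
    (groups ++ [(start, i + 1, PySem.List.slice lines (some start) (some (i + 1)))], i + 1, (0 : Int))
  else (groups, start, depth)

def group_logical_statements_alt (lines : List String) : List (Int × Int × List String) :=
  match (PySem.List.enumerate lines).foldl (pvStepB lines) ([], 0, 0) with
  | (groups, start, _) =>
    if start < PySem.List.len lines then
      groups ++ [(start, PySem.List.len lines, PySem.List.slice lines (some start) none)]
    else groups

-- ===== PRECONDITION & SPEC =====
def Spec_group_logical_statements (lines : List String) (out : List (Int × Int × List String)) : Prop := out = group_logical_statements_alt lines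
instance (lines : List String) (out : List (Int × Int × List String)) : Decidable (Spec_group_logical_statements lines out) := by unfold Spec_group_logical_statements; infer_instance

-- ===== CLAIM (what is proved, stated in full; the proofs are below) =====
def Claim_equal_group_logical_statements : Prop := ∀ (lines : List String), Dom_group_logical_statements lines → Spec_group_logical_statements lines (group_logical_statements lines)

-- ===== LEMMAS AND PROOFS =====

-- A's comment scan, index form: number of chars of the comment-stripped prefix, offset by j
def pvCE : List Char → Option (List Char) → Bool → Nat → Nat
  | [], _, _, j => j
  | ch :: rest, none, esc, j =>
      if ch = '#' then j
      else if ch = '"' ∨ ch = '\'' then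
        if (ch :: rest).take 3 = ['"', '"', '"'] ∨ (ch :: rest).take 3 = ['\'', '\'', '\''] then
          pvCE rest (some ((ch :: rest).take 3)) esc (j + 1)
        else pvCE rest (some [ch]) esc (j + 1)
      else pvCE rest none esc (j + 1)
  | ch :: rest, some s, esc, j =>
      if esc = false then
        if s.length = 3 ∧ (ch :: rest).take 3 = s then pvCE rest none false (j + 1)
        else if s.length = 1 ∧ s = [ch] then pvCE rest none false (j + 1)
        else if ch = '\\' then pvCE rest (some s) true (j + 1)
        else pvCE rest (some s) false (j + 1)
      else pvCE rest (some s) false (j + 1)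

theorem pvCE_shift (cs : List Char) : ∀ s esc j, pvCE cs s esc j = j + pvCE cs s esc 0 := by
  induction cs with
  | nil => intro s esc j; simp [pvCE]
  | cons ch rest ih =>
    intro s esc j
    match s with
    | none =>
      simp only [pvCE]
      split_ifs <;> simp <;> rw [ih, ih _ _ 1] <;> omega
    | some str =>
      simp only [pvCE]
      split_ifs <;> rw [ih, ih _ _ 1] <;> omega

theorem pvScanA_eq_take (cs : List Char) : ∀ s esc acc,
    pvScanA cs s esc acc = acc.reverse ++ cs.take (pvCE cs s esc 0) := by
  induction cs with
  | nil => intro s esc acc; simp [pvScanA, pvCE]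
  | cons ch rest ih =>
    intro s esc acc
    match s with
    | none =>
      simp only [pvScanA, pvCE]
      split_ifs with h1 h2 h3 <;>
        simp [ih, pvCE_shift rest _ _ 1, List.take_succ_cons, Nat.add_comm 1]
    | some str =>
      simp only [pvScanA, pvCE]
      split_ifs <;> simp [ih, pvCE_shift rest _ _ 1, List.take_succ_cons, Nat.add_comm 1]

theorem pvDropCons (cs : List Char) (m : Nat) (hm : m < cs.length) :
    cs.drop m = cs.getD m ' ' :: cs.drop (m + 1) := by
  rw [List.getD_eq_getElem cs ' ' hm]; exact List.drop_eq_getElem_cons hm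

theorem pvSinglePrefix (cs : List Char) (m : Nat) (c : Char) :
    ([c] <+: cs.drop m) ↔ (m < cs.length ∧ cs.getD m ' ' = c) := by
  by_cases hm : m < cs.length
  · rw [pvDropCons cs m hm, List.cons_prefix_cons]
    constructor
    · rintro ⟨h1, -⟩; exact ⟨hm, h1.symm⟩
    · rintro ⟨-, h2⟩; exact ⟨h2.symm, List.nil_prefix⟩
  · have hnil : cs.drop m = [] := List.drop_eq_nil_of_le (by omega)
    simp [hnil, hm]

theorem pvEscRun_shift (cs : List Char) : ∀ d m r, m - r = d →
    pvEscRun cs (m + 1) (r + 1) = pvEscRun cs m r + 1 := by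
  intro d
  induction d with
  | zero =>
    intro m r h
    rw [pvEscRun, dif_neg (fun hx : r + 1 < m + 1 ∧ _ => by omega)]
    conv_rhs => rw [pvEscRun, dif_neg (fun hx : r < m ∧ _ => by omega)]
  | succ d ih =>
    intro m r h
    have e : m + 1 - (r + 1) - 1 = m - r - 1 := by omega
    by_cases hg : r < m ∧ cs.getD (m - r - 1) ' ' = '\\'
    · rw [pvEscRun, e, dif_pos ⟨by omega, hg.2⟩, ih m (r + 1) (by omega)]
      conv_rhs => rw [pvEscRun, dif_pos hg]
    · rw [pvEscRun, e, dif_neg (fun hx => hg ⟨by omega, hx.2⟩)]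
      conv_rhs => rw [pvEscRun, dif_neg hg]

theorem pvEscOdd_succ (cs : List Char) (m : Nat) :
    pvEscOdd cs (m + 1) = if cs.getD m ' ' = '\\' then !pvEscOdd cs m else false := by
  unfold pvEscOdd
  rw [pvEscRun]
  have e : m + 1 - 0 - 1 = m := by omega
  rw [e]
  by_cases hb : cs.getD m ' ' = '\\'
  · rw [dif_pos ⟨by omega, hb⟩, if_pos hb, pvEscRun_shift cs (m - 0) m 0 rfl]
    rcases Nat.mod_two_eq_zero_or_one (pvEscRun cs m 0) with h | h <;> simp [Nat.add_mod, h]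
  · rw [dif_neg (fun hx => hb hx.2), if_neg hb]; decide

theorem pvEscOdd_false (cs : List Char) (p : Nat) (h : cs.getD (p - 1) ' ' ≠ '\\') :
    pvEscOdd cs p = false := by
  cases p with
  | zero =>
    unfold pvEscOdd
    rw [pvEscRun, dif_neg (fun hx : 0 < 0 ∧ _ => by omega)]
    decide
  | succ k => rw [pvEscOdd_succ, if_neg (by simpa using h)]

theorem pvTake3Prefix (s xs : List Char) (h : s.length = 3) : (xs.take 3 = s) ↔ s <+: xs := by
  rw [List.prefix_iff_eq_take, h]; exact eq_comm

theorem pvSingleEq (s : List Char) (h : s.length = 1) (ch : Char) (rest : List Char) :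
    (s = [ch]) ↔ s <+: ch :: rest := by
  match s, h with
  | [a], _ => simp [List.cons_prefix_cons]

theorem pvNoMatchAfter (cs s : List Char) (p : Nat) (hno : ¬ s <:+: cs.drop p) :
    ∀ m, p ≤ m → ¬ s <+: cs.drop m := by
  intro m hm hpref
  apply hno
  have e : cs.drop m = (cs.drop p).drop (m - p) := by rw [List.drop_drop]; congr 1; omega
  rw [e] at hpref
  exact hpref.isInfix.trans (List.drop_suffix (m - p) (cs.drop p)).isInfix

theorem pvOuterSkip (cs : List Char) : ∀ d p t esc, t - p = d → p ≤ t → t ≤ cs.length →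
    (∀ m, p ≤ m → m < t →
      cs.getD m ' ' ≠ '#' ∧ cs.getD m ' ' ≠ '"' ∧ cs.getD m ' ' ≠ '\'') →
    pvCE (cs.drop p) none esc 0 = (t - p) + pvCE (cs.drop t) none esc 0 := by
  intro d
  induction d with
  | zero =>
    intro p t esc hd hpt htn hb
    have : p = t := by omega
    subst this; simp
  | succ d ih =>
    intro p t esc hd hpt htn hb
    have hp : p < cs.length := by omega
    have hstep := hb p le_rfl (by omega)
    rw [pvDropCons cs p hp]
    simp only [pvCE]
    rw [if_neg hstep.1, if_neg (fun hx => hx.elim hstep.2.1 hstep.2.2)]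
    rw [pvCE_shift, ih (p + 1) t esc (by omega) (by omega) htn
      (fun m h1 h2 => hb m (by omega) h2)]
    omega

theorem pvInnerWalk (cs s : List Char) (hlen : s.length = 3 ∨ s.length = 1) :
    ∀ d p t, t - p = d → p ≤ t → t ≤ cs.length →
    (∀ m, p ≤ m → m < t → ¬ s <+: cs.drop m) →
    pvCE (cs.drop p) (some s) (pvEscOdd cs p) 0
      = (t - p) + pvCE (cs.drop t) (some s) (pvEscOdd cs t) 0 := by
  intro d
  induction d with
  | zero =>
    intro p t hd hpt htn hb
    have : p = t := by omega
    subst this; simp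
  | succ d ih =>
    intro p t hd hpt htn hb
    have hp : p < cs.length := by omega
    have hnm := hb p le_rfl (by omega)
    have ihs := ih (p + 1) t (by omega) (by omega) htn (fun m h1 h2 => hb m (by omega) h2)
    rw [pvDropCons cs p hp]
    simp only [pvCE]
    by_cases hesc : pvEscOdd cs p = true
    · have hnext : pvEscOdd cs (p + 1) = false := by
        rw [pvEscOdd_succ]
        by_cases hbs : cs.getD p ' ' = '\\' <;> simp [hbs, hesc]
      rw [hesc, if_neg (by simp), pvCE_shift, ← hnext, ihs]
      omega
    · have hesc' : pvEscOdd cs p = false := by simpa using hesc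
      rw [hesc', if_pos rfl]
      have hc1 : ¬ (s.length = 3 ∧ (cs.getD p ' ' :: cs.drop (p + 1)).take 3 = s) := by
        rintro ⟨h3, ht⟩
        exact hnm (by rw [pvDropCons cs p hp]; exact (pvTake3Prefix s _ h3).mp ht)
      have hc2 : ¬ (s.length = 1 ∧ s = [cs.getD p ' ']) := by
        rintro ⟨h1, hseq⟩
        exact hnm (by rw [pvDropCons cs p hp]; exact (pvSingleEq s h1 _ _).mp hseq)
      rw [if_neg hc1, if_neg hc2]
      split_ifs with hbs
      · have hbs' : cs.getD p ' ' = '\\' := by simpa using hbs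
        have hnext : pvEscOdd cs (p + 1) = true := by
          rw [pvEscOdd_succ, if_pos hbs', hesc']; rfl
        rw [pvCE_shift, ← hnext, ihs]
        omega
      · have hbs' : ¬ cs.getD p ' ' = '\\' := by simpa using hbs
        have hnext : pvEscOdd cs (p + 1) = false := by
          rw [pvEscOdd_succ, if_neg hbs']
        rw [pvCE_shift, ← hnext, ihs]
        omega

theorem pvCloseStep (cs s : List Char) (c : Nat) (hlen : s.length = 3 ∨ s.length = 1)
    (hpref : s <+: cs.drop c) (hc : c < cs.length) :
    pvCE (cs.drop c) (some s) false 0 = 1 + pvCE (cs.drop (c + 1)) none false 0 := by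
  rw [pvDropCons cs c hc]
  simp only [pvCE, if_true]
  rcases hlen with h3 | h1
  · rw [if_pos ⟨h3, (pvTake3Prefix s (cs.getD c ' ' :: cs.drop (c + 1)) h3).mpr
      (by rw [← pvDropCons cs c hc]; exact hpref)⟩, pvCE_shift]
  · have hs1 : s = [cs.getD c ' '] := by
      rw [pvDropCons cs c hc] at hpref
      exact (pvSingleEq s h1 _ _).mpr hpref
    rw [if_neg (fun hx => by have := hx.1; omega), if_pos ⟨h1, hs1⟩, pvCE_shift]

theorem pvSkipStep (cs s : List Char) (c : Nat) (hesc : pvEscOdd cs c = true)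
    (hc : c < cs.length) :
    pvCE (cs.drop c) (some s) (pvEscOdd cs c) 0
      = 1 + pvCE (cs.drop (c + 1)) (some s) false 0 := by
  rw [pvDropCons cs c hc]
  simp only [pvCE]
  rw [hesc, if_neg (by simp), pvCE_shift]

theorem pvFindChar_at (cs : List Char) (ch : Char) (p : Nat) (hp : p ≤ cs.length)
    (hne : PySem.Chars.findFrom cs [ch] (p : Int) ≠ -1) :
    (p : Int) ≤ PySem.Chars.findFrom cs [ch] (p : Int) ∧
    (PySem.Chars.findFrom cs [ch] (p : Int)).toNat < cs.length ∧
    cs.getD (PySem.Chars.findFrom cs [ch] (p : Int)).toNat ' ' = ch ∧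
    (∀ m, p ≤ m → m < (PySem.Chars.findFrom cs [ch] (p : Int)).toNat →
      cs.getD m ' ' ≠ ch) := by
  have hspec := PySem.Chars.findFrom_natCast_spec cs [ch] p hp hne
  have hat := (pvSinglePrefix cs _ ch).mp hspec.2.1
  refine ⟨hspec.1, hat.1, hat.2, fun m h1 h2 hch => ?_⟩
  have hmlen : m < cs.length := by omega
  exact hspec.2.2 m h1 h2 ((pvSinglePrefix cs m ch).mpr ⟨hmlen, hch⟩)

theorem pvFindChar_none (cs : List Char) (ch : Char) (p : Nat) (hp : p ≤ cs.length)
    (h : PySem.Chars.findFrom cs [ch] (p : Int) = -1) :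
    ∀ m, p ≤ m → m < cs.length → cs.getD m ' ' ≠ ch := by
  intro m h1 h2 hch
  have hni := (PySem.Chars.findFrom_natCast_eq_neg_one_iff cs [ch] p hp).mp h
  exact pvNoMatchAfter cs [ch] p hni m h1 ((pvSinglePrefix cs m ch).mpr ⟨h2, hch⟩)

theorem pvQ_none_char (cs : List Char) (p : Nat) (hp : p ≤ cs.length) (h : pvQ cs p = -1) :
    ∀ m, p ≤ m → m < cs.length → cs.getD m ' ' ≠ '"' ∧ cs.getD m ' ' ≠ '\'' := by
  have hboth : PySem.Chars.findFrom cs ['"'] (p : Int) = -1 ∧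
      PySem.Chars.findFrom cs ['\''] (p : Int) = -1 := by
    unfold pvQ pvMinIdx at h
    split_ifs at h with h1 h2
    · exact ⟨h1, h⟩
    · exact absurd h h1
    · have a1 := (PySem.Chars.findFrom_natCast_spec cs ['"'] p hp h1).1
      have a2 := (PySem.Chars.findFrom_natCast_spec cs ['\''] p hp h2).1
      rcases min_cases (PySem.Chars.findFrom cs ['"'] (p : Int))
        (PySem.Chars.findFrom cs ['\''] (p : Int)) with ⟨he, -⟩ | ⟨he, -⟩ <;>
        rw [he] at h <;> omega
  exact fun m h1 h2 =>
    ⟨pvFindChar_none cs '"' p hp hboth.1 m h1 h2, pvFindChar_none cs '\'' p hp hboth.2 m h1 h2⟩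

theorem pvQ_found (cs : List Char) (p : Nat) (hp : p ≤ cs.length) (hq : pvQ cs p ≠ -1) :
    (p : Int) ≤ pvQ cs p ∧ (pvQ cs p).toNat < cs.length ∧
    (cs.getD (pvQ cs p).toNat ' ' = '"' ∨ cs.getD (pvQ cs p).toNat ' ' = '\'') ∧
    (∀ m, p ≤ m → m < (pvQ cs p).toNat →
      cs.getD m ' ' ≠ '"' ∧ cs.getD m ' ' ≠ '\'') := by
  unfold pvQ pvMinIdx at hq ⊢
  split_ifs at hq ⊢ with h1 h2
  · have hat := pvFindChar_at cs '\'' p hp hq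
    exact ⟨hat.1, hat.2.1, Or.inr hat.2.2.1, fun m hm1 hm2 =>
      ⟨pvFindChar_none cs '"' p hp h1 m hm1 (by omega), hat.2.2.2 m hm1 hm2⟩⟩
  · have hat := pvFindChar_at cs '"' p hp hq
    exact ⟨hat.1, hat.2.1, Or.inl hat.2.2.1, fun m hm1 hm2 =>
      ⟨hat.2.2.2 m hm1 hm2, pvFindChar_none cs '\'' p hp h2 m hm1 (by omega)⟩⟩
  · have hatd := pvFindChar_at cs '"' p hp h1
    have hats := pvFindChar_at cs '\'' p hp h2
    rcases le_total (PySem.Chars.findFrom cs ['"'] (p : Int))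
        (PySem.Chars.findFrom cs ['\''] (p : Int)) with hab | hab
    · rw [min_eq_left hab] at hq ⊢
      refine ⟨hatd.1, hatd.2.1, Or.inl hatd.2.2.1, fun m hm1 hm2 => ?_⟩
      exact ⟨hatd.2.2.2 m hm1 hm2, hats.2.2.2 m hm1 (by omega)⟩
    · rw [min_eq_right hab] at hq ⊢
      refine ⟨hats.1, hats.2.1, Or.inr hats.2.2.1, fun m hm1 hm2 => ?_⟩
      exact ⟨hatd.2.2.2 m hm1 (by omega), hats.2.2.2 m hm1 hm2⟩

theorem pvDelim_spec (cs : List Char) (q : Nat) (hq : q < cs.length)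
    (hch : cs.getD q ' ' = '"' ∨ cs.getD q ' ' = '\'') :
    ((pvDelim cs q).length = 3 ∨ (pvDelim cs q).length = 1) ∧
    (∀ x ∈ pvDelim cs q, x ≠ '\\') := by
  unfold pvDelim
  split_ifs with ht
  · rcases ht with h | h <;> rw [h] <;> exact ⟨Or.inl rfl, by simp⟩
  · have h1 : (cs.drop q).take 1 = [cs.getD q ' '] := by rw [pvDropCons cs q hq]; rfl
    rw [h1]
    refine ⟨Or.inr rfl, fun x hx => ?_⟩
    simp only [List.mem_singleton] at hx
    subst hx
    rcases hch with h | h <;> rw [h] <;> decide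

theorem pvEnterStep (cs : List Char) (q : Nat) (hq : q < cs.length)
    (hch : cs.getD q ' ' = '"' ∨ cs.getD q ' ' = '\'') :
    pvCE (cs.drop q) none false 0 = 1 + pvCE (cs.drop (q + 1)) (some (pvDelim cs q)) false 0 := by
  rw [pvDropCons cs q hq]
  simp only [pvCE]
  have hnh : cs.getD q ' ' ≠ '#' := by rcases hch with h | h <;> rw [h] <;> decide
  rw [if_neg hnh, if_pos hch]
  have hcons : cs.getD q ' ' :: cs.drop (q + 1) = cs.drop q := (pvDropCons cs q hq).symm
  rw [hcons]
  unfold pvDelim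
  split_ifs with ht
  · rw [pvCE_shift]
  · have h1 : (cs.drop q).take 1 = [cs.getD q ' '] := by rw [pvDropCons cs q hq]; rfl
    rw [h1, pvCE_shift]

theorem pvInnerFull (cs s : List Char) (hlen : s.length = 3 ∨ s.length = 1)
    (hnbs : ∀ x ∈ s, x ≠ '\\') (p2 : Nat) :
    p2 ≤ cs.length → cs.getD (p2 - 1) ' ' ≠ '\\' →
    (∀ c, pvFindClose cs s p2 = some c → p2 ≤ c ∧ c < cs.length ∧
        pvCE (cs.drop p2) (some s) false 0
          = (c + 1 - p2) + pvCE (cs.drop (c + 1)) none false 0)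
    ∧ (pvFindClose cs s p2 = none →
        pvCE (cs.drop p2) (some s) false 0 = cs.length - p2) := by
  have hsne : s ≠ [] := by
    rcases hlen with h | h <;> exact fun he => by simp [he] at h
  fun_induction pvFindClose cs s p2 with
  | case1 p hp c0 hc =>
    intro hpn hnb
    refine ⟨fun c h => absurd h (by simp), fun _ => ?_⟩
    have hni := (PySem.Chars.findFrom_natCast_eq_neg_one_iff cs s p hp).mp hc
    have hesc0 : pvEscOdd cs p = false := pvEscOdd_false cs p hnb
    have hwalk := pvInnerWalk cs s hlen (cs.length - p) p cs.length rfl hpn le_rfl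
      (fun m h1 _ => pvNoMatchAfter cs s p hni m h1)
    rw [← hesc0, hwalk, List.drop_length]
    have h0 : pvCE ([] : List Char) (some s) (pvEscOdd cs cs.length) 0 = 0 := rfl
    rw [h0]
    omega
  | case2 p hp c0 hc hesc ih =>
    intro hpn hnb
    have hspec : (p : Int) ≤ c0 ∧ s <+: cs.drop c0.toNat ∧
        (∀ i, p ≤ i → i < c0.toNat → ¬ s <+: cs.drop i) :=
      PySem.Chars.findFrom_natCast_spec cs s p hp hc
    have hpc : p ≤ c0.toNat := by have := hspec.1; omega
    have hpref : s <+: cs.drop c0.toNat := hspec.2.1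
    have hlt : c0.toNat < cs.length := by
      by_contra hge2
      rw [List.drop_eq_nil_of_le (by omega)] at hpref
      exact hsne (List.prefix_nil.mp hpref)
    have hhead : cs.getD c0.toNat ' ' ≠ '\\' := by
      obtain ⟨a, s', rfl⟩ : ∃ a s', s = a :: s' := by
        cases s with
        | nil => exact absurd rfl hsne
        | cons a s' => exact ⟨a, s', rfl⟩
      rw [pvDropCons cs _ hlt] at hpref
      have he := (List.cons_prefix_cons.mp hpref).1
      rw [← he]
      exact hnbs a (by simp)
    have IH := ih (by omega) (by simpa using hhead)
    have hesc0 : pvEscOdd cs p = false := pvEscOdd_false cs p hnb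
    have hwalk := pvInnerWalk cs s hlen (c0.toNat - p) p c0.toNat rfl hpc
      (le_of_lt hlt) hspec.2.2
    have hskip := pvSkipStep cs s c0.toNat hesc hlt
    constructor
    · intro c h
      obtain ⟨h1, h2, h3⟩ := IH.1 c h
      refine ⟨by omega, h2, ?_⟩
      calc pvCE (cs.drop p) (some s) false 0
          = (c0.toNat - p) + pvCE (cs.drop c0.toNat) (some s) (pvEscOdd cs c0.toNat) 0 := by
            rw [← hesc0]; exact hwalk
        _ = (c0.toNat - p) + (1 + pvCE (cs.drop (c0.toNat + 1)) (some s) false 0) := by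
            rw [hskip]
        _ = (c0.toNat - p) + (1 + ((c + 1 - (c0.toNat + 1))
              + pvCE (cs.drop (c + 1)) none false 0)) := by rw [h3]
        _ = (c + 1 - p) + pvCE (cs.drop (c + 1)) none false 0 := by omega
    · intro h
      have h2 := IH.2 h
      calc pvCE (cs.drop p) (some s) false 0
          = (c0.toNat - p) + pvCE (cs.drop c0.toNat) (some s) (pvEscOdd cs c0.toNat) 0 := by
            rw [← hesc0]; exact hwalk
        _ = (c0.toNat - p) + (1 + pvCE (cs.drop (c0.toNat + 1)) (some s) false 0) := by
            rw [hskip]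
        _ = (c0.toNat - p) + (1 + (cs.length - (c0.toNat + 1))) := by rw [h2]
        _ = cs.length - p := by omega
  | case3 p hp c0 hc hesc =>
    intro hpn hnb
    have hspec : (p : Int) ≤ c0 ∧ s <+: cs.drop c0.toNat ∧
        (∀ i, p ≤ i → i < c0.toNat → ¬ s <+: cs.drop i) :=
      PySem.Chars.findFrom_natCast_spec cs s p hp hc
    have hpc : p ≤ c0.toNat := by have := hspec.1; omega
    have hpref : s <+: cs.drop c0.toNat := hspec.2.1
    have hlt : c0.toNat < cs.length := by
      by_contra hge2
      rw [List.drop_eq_nil_of_le (by omega)] at hpref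
      exact hsne (List.prefix_nil.mp hpref)
    have hesc' : pvEscOdd cs c0.toNat = false := by simpa using hesc
    have hesc0 : pvEscOdd cs p = false := pvEscOdd_false cs p hnb
    have hwalk := pvInnerWalk cs s hlen (c0.toNat - p) p c0.toNat rfl hpc
      (le_of_lt hlt) hspec.2.2
    refine ⟨fun c h => ?_, fun h => absurd h (by simp)⟩
    obtain rfl : c0.toNat = c := (Option.some.injEq _ _).mp h
    refine ⟨hpc, hlt, ?_⟩
    calc pvCE (cs.drop p) (some s) false 0
        = (c0.toNat - p) + pvCE (cs.drop c0.toNat) (some s) (pvEscOdd cs c0.toNat) 0 := by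
          rw [← hesc0]; exact hwalk
      _ = (c0.toNat - p) + pvCE (cs.drop c0.toNat) (some s) false 0 := by rw [hesc']
      _ = (c0.toNat - p) + (1 + pvCE (cs.drop (c0.toNat + 1)) none false 0) := by
          rw [pvCloseStep cs s c0.toNat hlen hpref hlt]
      _ = (c0.toNat + 1 - p) + pvCE (cs.drop (c0.toNat + 1)) none false 0 := by omega
  | case4 p hp => intro hpn _; exact absurd hpn hp

theorem pvCodeEndB_eq_aux (cs : List Char) (p : Nat) : p ≤ cs.length →
    pvCodeEndB cs p = p + pvCE (cs.drop p) none false 0 := by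
  fun_induction pvCodeEndB cs p with
  | case1 p hp hcond =>
    intro _
    obtain ⟨hne, hdisj⟩ := hcond
    have hat := pvFindChar_at cs '#' p hp hne
    have hblock : ∀ m, p ≤ m → m < (PySem.Chars.findFrom cs ['#'] (p : Int)).toNat →
        cs.getD m ' ' ≠ '#' ∧ cs.getD m ' ' ≠ '"' ∧ cs.getD m ' ' ≠ '\'' := by
      intro m h1 h2
      have hmlen : m < cs.length := by have := hat.2.1; omega
      refine ⟨hat.2.2.2 m h1 h2, ?_⟩
      rcases hdisj with hqn | hlt
      · exact pvQ_none_char cs p hp hqn m h1 hmlen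
      · have hqf := pvQ_found cs p hp (by intro he; have := hat.1; rw [he] at hlt; omega)
        exact hqf.2.2.2 m h1 (by have := hat.1; omega)
    have hskipO := pvOuterSkip cs ((PySem.Chars.findFrom cs ['#'] (p : Int)).toNat - p) p
      (PySem.Chars.findFrom cs ['#'] (p : Int)).toNat false rfl (by have := hat.1; omega)
      (le_of_lt hat.2.1) hblock
    have hstop : pvCE (cs.drop (PySem.Chars.findFrom cs ['#'] (p : Int)).toNat)
        none false 0 = 0 := by
      rw [pvDropCons cs _ hat.2.1]
      simp only [pvCE]
      rw [if_pos hat.2.2.1]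
    rw [hskipO, hstop]
    have := hat.1; omega
  | case2 p hp hcond hqn =>
    intro _
    have hf : PySem.Chars.findFrom cs ['#'] (p : Int) = -1 := by
      by_contra hne
      exact hcond ⟨hne, Or.inl hqn⟩
    have hnoq := pvQ_none_char cs p hp hqn
    have hnoh := pvFindChar_none cs '#' p hp hf
    have hskipO := pvOuterSkip cs (cs.length - p) p cs.length false rfl hp le_rfl
      (fun m h1 h2 => ⟨hnoh m h1 h2, hnoq m h1 h2⟩)
    have h0 : pvCE ([] : List Char) none false 0 = 0 := rfl
    rw [hskipO, List.drop_length, h0]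
    omega
  | case3 p hp hcond hq hc =>
    intro _
    have hqf := pvQ_found cs p hp hq
    have hnoh : ∀ m, p ≤ m → m < (pvQ cs p).toNat → cs.getD m ' ' ≠ '#' := by
      intro m h1 h2
      by_cases hne : PySem.Chars.findFrom cs ['#'] (p : Int) = -1
      · exact pvFindChar_none cs '#' p hp hne m h1 (by have := hqf.2.1; omega)
      · have hat := pvFindChar_at cs '#' p hp hne
        have hge : pvQ cs p ≤ PySem.Chars.findFrom cs ['#'] (p : Int) := by
          by_contra hlt2
          exact hcond ⟨hne, Or.inr (by omega)⟩
        exact hat.2.2.2 m h1 (by have := hqf.1; have := hat.1; omega)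
    have hskipO := pvOuterSkip cs ((pvQ cs p).toNat - p) p (pvQ cs p).toNat false rfl
      (by have := hqf.1; omega) (le_of_lt hqf.2.1)
      (fun m h1 h2 => ⟨hnoh m h1 h2, hqf.2.2.2 m h1 h2⟩)
    have hds := pvDelim_spec cs (pvQ cs p).toNat hqf.2.1 hqf.2.2.1
    have henter := pvEnterStep cs (pvQ cs p).toNat hqf.2.1 hqf.2.2.1
    have hnb : cs.getD (pvQ cs p).toNat ' ' ≠ '\\' := by
      rcases hqf.2.2.1 with h | h <;> rw [h] <;> decide
    have hinner := pvInnerFull cs (pvDelim cs (pvQ cs p).toNat) hds.1 hds.2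
      ((pvQ cs p).toNat + 1) (by have := hqf.2.1; omega) (by simpa using hnb)
    have h2 := hinner.2 hc
    rw [hskipO, henter, h2]
    have := hqf.1
    have := hqf.2.1
    omega
  | case4 p hp hcond hq c hc ih =>
    intro _
    have hqf := pvQ_found cs p hp hq
    have hnoh : ∀ m, p ≤ m → m < (pvQ cs p).toNat → cs.getD m ' ' ≠ '#' := by
      intro m h1 h2
      by_cases hne : PySem.Chars.findFrom cs ['#'] (p : Int) = -1
      · exact pvFindChar_none cs '#' p hp hne m h1 (by have := hqf.2.1; omega)
      · have hat := pvFindChar_at cs '#' p hp hne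
        have hge : pvQ cs p ≤ PySem.Chars.findFrom cs ['#'] (p : Int) := by
          by_contra hlt2
          exact hcond ⟨hne, Or.inr (by omega)⟩
        exact hat.2.2.2 m h1 (by have := hqf.1; have := hat.1; omega)
    have hskipO := pvOuterSkip cs ((pvQ cs p).toNat - p) p (pvQ cs p).toNat false rfl
      (by have := hqf.1; omega) (le_of_lt hqf.2.1)
      (fun m h1 h2 => ⟨hnoh m h1 h2, hqf.2.2.2 m h1 h2⟩)
    have hds := pvDelim_spec cs (pvQ cs p).toNat hqf.2.1 hqf.2.2.1
    have henter := pvEnterStep cs (pvQ cs p).toNat hqf.2.1 hqf.2.2.1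
    have hnb : cs.getD (pvQ cs p).toNat ' ' ≠ '\\' := by
      rcases hqf.2.2.1 with h | h <;> rw [h] <;> decide
    have hinner := pvInnerFull cs (pvDelim cs (pvQ cs p).toNat) hds.1 hds.2
      ((pvQ cs p).toNat + 1) (by have := hqf.2.1; omega) (by simpa using hnb)
    obtain ⟨h1c, h2c, h3c⟩ := hinner.1 c hc
    rw [ih (by omega), hskipO, henter, h3c]
    have := hqf.1
    omega
  | case5 p hp => intro h; exact absurd h hp

-- the jump scanner computes the char machine's answer
theorem pvCodeEndB_eq_pvCE (cs : List Char) : pvCodeEndB cs 0 = pvCE cs none false 0 := by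
  have h := pvCodeEndB_eq_aux cs 0 (by omega)
  simpa using h

theorem paren_foldl (cs : List Char) : ∀ d : Int,
    cs.foldl (fun d ch => if ch = '(' then d + 1 else if ch = ')' then d - 1 else d) d
      = d + (cs.count '(' : Int) - (cs.count ')' : Int) := by
  induction cs with
  | nil => intro d; simp
  | cons ch rest ih =>
    intro d
    simp only [List.foldl_cons, List.count_cons, ih]
    split_ifs with h1 h2 <;> subst_eqs <;> simp_all <;> omega

theorem stepA_depth (line : String) (d : Int) :
    (pvScanA line.toList none false []).foldl
      (fun d ch => if ch = '(' then d + 1 else if ch = ')' then d - 1 else d) d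
      = d + pvDelta line := by
  rw [pvScanA_eq_take, paren_foldl]
  simp [pvDelta, pvCodeEndB_eq_pvCE]
  ring

-- the main invariant: processing the suffix `suf` (indices starting at pre.length) from a
-- matched pair of states gives equal final results; lines = pre ++ suf stays fixed.
theorem pvMain (lines : List String) : ∀ (suf pre : List String) (g : List (Int × Int × List String))
    (s : Nat) (d : Int), pre ++ suf = lines → s ≤ pre.length →
    (match (PySem.List.enumerate suf (pre.length : Int)).foldl pvStepA
        (g, (s : Int), pre.drop s, d) with
     | (groups, current_start, current_lines, _) =>
       if current_lines ≠ [] then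
         groups ++ [(current_start, current_start + (current_lines.length : Int), current_lines)]
       else groups)
    =
    (match (PySem.List.enumerate suf (pre.length : Int)).foldl (pvStepB lines)
        (g, (s : Int), d) with
     | (groups, start, _) =>
       if start < PySem.List.len lines then
         groups ++ [(start, PySem.List.len lines, PySem.List.slice lines (some start) none)]
       else groups) := by
  intro suf
  induction suf with
  | nil =>
    intro pre g s d hpre hs
    simp only [List.append_nil] at hpre
    subst hpre
    simp only [PySem.List.enumerate_nil, List.foldl_nil]
    rw [PySem.List.slice_from_natCast]
    simp only [PySem.List.len_eq, ne_eq, List.drop_eq_nil_iff, List.length_drop, not_le]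
    by_cases hlt : s < pre.length
    · rw [if_pos hlt, if_pos (by exact_mod_cast hlt)]
      have hc : (s : Int) + ((pre.length - s : Nat) : Int) = (pre.length : Int) := by omega
      rw [hc]
    · rw [if_neg hlt, if_neg (by exact_mod_cast hlt)]
  | cons x suf ih =>
    intro pre g s d hpre hs
    simp only [PySem.List.enumerate_cons, List.foldl_cons]
    have hstepA : pvStepA (g, (s : Int), pre.drop s, d) ((pre.length : Int), x)
        = if d + pvDelta x ≤ 0 then
            (g ++ [((s : Int), (pre.length : Int) + 1, pre.drop s ++ [x])],
              (pre.length : Int) + 1, ([] : List String), (0 : Int))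
          else (g, (s : Int), pre.drop s ++ [x], d + pvDelta x) := by
      simp only [pvStepA, stepA_depth]
    have hstepB : pvStepB lines (g, (s : Int), d) ((pre.length : Int), x)
        = if d + pvDelta x ≤ 0 then
            (g ++ [((s : Int), (pre.length : Int) + 1,
              PySem.List.slice lines (some (s : Int)) (some ((pre.length : Int) + 1)))],
              (pre.length : Int) + 1, (0 : Int))
          else (g, (s : Int), d + pvDelta x) := by
      simp only [pvStepB]
    rw [hstepA, hstepB]
    have hslice : PySem.List.slice lines (some (s : Int)) (some ((pre.length : Int) + 1))
        = pre.drop s ++ [x] := by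
      have hcast : ((pre.length : Int) + 1) = ((pre.length + 1 : Nat) : Int) := by push_cast; ring
      rw [hcast, PySem.List.slice_natCast, ← hpre]
      rw [List.drop_append_of_le_length hs]
      rw [List.take_append]
      have hlen : (pre.drop s).length = pre.length - s := List.length_drop ..
      rw [List.take_of_length_le (by omega), hlen]
      have h1 : pre.length + 1 - s - (pre.length - s) = 1 := by omega
      simp [h1]
    have hdropnil : (pre ++ [x]).drop (pre ++ [x]).length = ([] : List String) := by simp
    have hdrop : (pre ++ [x]).drop s = pre.drop s ++ [x] := List.drop_append_of_le_length hs
    by_cases hd : d + pvDelta x ≤ 0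
    · rw [if_pos hd, if_pos hd, hslice]
      have H := ih (pre ++ [x]) (g ++ [((s : Int), (pre.length : Int) + 1, pre.drop s ++ [x])])
        (pre ++ [x]).length 0 (by simp [← hpre]) (le_refl _)
      rw [hdropnil] at H
      simp only [List.length_append, List.length_cons, List.length_nil] at H
      push_cast at H
      exact H
    · rw [if_neg hd, if_neg hd]
      have H := ih (pre ++ [x]) g s (d + pvDelta x) (by simp [← hpre])
        (by simp; omega)
      rw [hdrop] at H
      simp only [List.length_append, List.length_cons, List.length_nil] at H
      push_cast at H
      exact H

-- ===== VERDICT (by name: the statement is the Claim_ definition above) =====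
theorem group_logical_statements_spec : Claim_equal_group_logical_statements := by
  intro lines _
  unfold Spec_group_logical_statements group_logical_statements group_logical_statements_alt
  have := pvMain lines lines [] [] 0 0 (by simp) (by simp)
  simpa using this
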